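-- pv_equiv track=rewrite | github.com/roz007/data_process | assign.py | non_lapping
-- ===== SOURCE A (Python) =====
-- from collections import Counter
--
-- def non_lapping(obj):
--     te_list = []
--     lap_dict = Counter(obj)
--     lap_key = lap_dict.keys()
--
--     for items in lap_key:
--         if lap_dict[items] <= 1:
--             te_list.append(items)
--     return te_list
-- ===== SOURCE B (Python) =====
-- def non_lapping(obj):
--     first = {}
--     last = {}
--     for i, x in enumerate(obj):
--         if x not in first:
--             first[x] = i
--         last[x] = i
--     return [x for i, x in enumerate(obj) if first[x] == i and last[x] == i]
-- ===== Notes on version B (the rewrite author's own statement) =====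
-- stated objective: alternative
-- what changed: Instead of counting occurrences with a Counter and scanning its keys, B records each element's first and last occurrence index and emits the element at position i exactly when i is both its first and last occurrence, so uniqueness and order fall out of index comparison rather than counts.
import Mathlib
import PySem

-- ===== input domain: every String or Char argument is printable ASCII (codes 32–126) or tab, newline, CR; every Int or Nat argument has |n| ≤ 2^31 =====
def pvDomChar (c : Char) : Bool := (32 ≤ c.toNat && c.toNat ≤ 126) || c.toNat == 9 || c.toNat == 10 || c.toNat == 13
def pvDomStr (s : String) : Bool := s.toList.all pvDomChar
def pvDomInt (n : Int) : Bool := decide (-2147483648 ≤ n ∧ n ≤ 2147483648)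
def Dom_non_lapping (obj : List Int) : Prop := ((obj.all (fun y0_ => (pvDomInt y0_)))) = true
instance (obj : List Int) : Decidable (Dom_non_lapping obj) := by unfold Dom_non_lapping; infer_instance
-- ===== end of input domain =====

-- B replaces the Counter build + keys scan by first/last occurrence indices: emit the element at position i exactly when i is both its first and its last occurrence; alternative decomposition, same return value.

-- ===== PORT A =====
def non_lapping (obj : List Int) : List Int :=
  let lapDict := PySem.Dict.counter obj
  let lapKey := lapDict.keys
  lapKey.foldl (fun teList items =>
    if lapDict.getD items 0 ≤ 1 then teList ++ [items] else teList) []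

-- ===== PORT B =====
-- the first loop of Source B: build the first- and last-occurrence-index dicts in one pass
def nlFirstLast (obj : List Int) : PySem.Dict Int Int × PySem.Dict Int Int :=
  (PySem.List.enumerate obj).foldl
    (fun (p : PySem.Dict Int Int × PySem.Dict Int Int) ix =>
      ((if p.1.contains ix.2 then p.1 else p.1.insert ix.2 ix.1), p.2.insert ix.2 ix.1))
    (PySem.Dict.empty, PySem.Dict.empty)

-- the list comprehension of Source B (first[x] and last[x] always exist: get? == some i is x's dict value being i)
def non_lapping_alt (obj : List Int) : List Int :=
  let fl := nlFirstLast obj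
  ((PySem.List.enumerate obj).filter
    (fun ix => fl.1.get? ix.2 == some ix.1 && fl.2.get? ix.2 == some ix.1)).map (·.2)

-- ===== PRECONDITION & SPEC =====
def Spec_non_lapping (obj : List Int) (out : List Int) : Prop := out = non_lapping_alt obj
instance (obj : List Int) (out : List Int) : Decidable (Spec_non_lapping obj out) := by unfold Spec_non_lapping; infer_instance

-- ===== CLAIM (what is proved, stated in full; the proofs are below) =====
def Claim_equal_non_lapping : Prop := ∀ (obj : List Int), Dom_non_lapping obj → Spec_non_lapping obj (non_lapping obj)

-- ===== LEMMAS AND PROOFS =====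

-- the paired fold is the two independent folds
theorem nl_fold_split (l : List (Int × Int)) : ∀ (d1 d2 : PySem.Dict Int Int),
    l.foldl (fun (p : PySem.Dict Int Int × PySem.Dict Int Int) ix =>
      ((if p.1.contains ix.2 then p.1 else p.1.insert ix.2 ix.1), p.2.insert ix.2 ix.1)) (d1, d2)
    = (l.foldl (fun d ix => if d.contains ix.2 then d else d.insert ix.2 ix.1) d1,
       l.foldl (fun d ix => d.insert ix.2 ix.1) d2) := by
  induction l with
  | nil => intro d1 d2; rfl
  | cons a t ih =>
    intro d1 d2
    simp only [List.foldl_cons]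
    exact ih _ _

-- the insert-if-absent fold keeps the FIRST value written for a key
theorem nl_first_get (x : Int) : ∀ (l : List (Int × Int)) (d : PySem.Dict Int Int),
    (l.foldl (fun d ix => if d.contains ix.2 then d else d.insert ix.2 ix.1) d).get? x
    = (l.filter (fun ix => ix.2 == x)).foldl
        (fun o ix => o.orElse (fun _ => some ix.1)) (d.get? x) := by
  intro l
  induction l with
  | nil => intro d; rfl
  | cons a t ih =>
    intro d
    obtain ⟨j, y⟩ := a
    simp only [List.foldl_cons]
    by_cases hax : y = x
    · subst hax
      rw [List.filter_cons_of_pos (by simp), List.foldl_cons]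
      by_cases hc : d.contains y = true
      · rw [if_pos hc, ih d]
        have hsome : (d.get? y).isSome := by
          rw [← PySem.Dict.contains_eq_isSome_get?]
          exact hc
        obtain ⟨v, hv⟩ := Option.isSome_iff_exists.mp hsome
        rw [hv]
        rfl
      · rw [if_neg hc, ih]
        have hnone : d.get? y = none := by
          exact (PySem.Dict.get?_eq_none_iff_contains d y).mpr (Bool.eq_false_iff.mpr hc)
        rw [hnone, PySem.Dict.get?_insert_self]
        rfl
    · rw [List.filter_cons_of_neg (by simp [hax])]
      by_cases hc : d.contains y = true
      · rw [if_pos hc, ih d]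
      · rw [if_neg hc, ih, PySem.Dict.get?_insert_of_ne _ _ (fun h => hax h.symm)]

-- the plain-insert fold keeps the LAST value written for a key
theorem nl_last_get (x : Int) : ∀ (l : List (Int × Int)) (d : PySem.Dict Int Int),
    (l.foldl (fun d ix => d.insert ix.2 ix.1) d).get? x
    = (l.filter (fun ix => ix.2 == x)).foldl (fun _ ix => some ix.1) (d.get? x) := by
  intro l
  induction l with
  | nil => intro d; rfl
  | cons a t ih =>
    intro d
    obtain ⟨j, y⟩ := a
    simp only [List.foldl_cons]
    by_cases hax : y = x
    · subst hax
      rw [List.filter_cons_of_pos (by simp), List.foldl_cons, ih,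
        PySem.Dict.get?_insert_self]
    · rw [List.filter_cons_of_neg (by simp [hax]), ih,
        PySem.Dict.get?_insert_of_ne _ _ (fun h => hax h.symm)]

-- an orElse-fold with a some seed never changes
theorem nl_orElse_some (m : List (Int × Int)) : ∀ (v : Int),
    m.foldl (fun o ix => o.orElse (fun _ => some ix.1)) (some v) = some v := by
  induction m with
  | nil => intro v; rfl
  | cons a t ih => intro v; simp only [List.foldl_cons, Option.orElse]; exact ih v

-- the orElse-fold from none returns the head's index
theorem nl_fold_head (m : List (Int × Int)) :
    m.foldl (fun o ix => o.orElse (fun _ => some ix.1)) none = m.head?.map (·.1) := by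
  cases m with
  | nil => rfl
  | cons a t => simp only [List.foldl_cons, Option.orElse, List.head?_cons, Option.map_some]
                exact nl_orElse_some t a.1

-- the overwrite-fold returns the last element's index (or the seed)
theorem nl_fold_last (m : List (Int × Int)) : ∀ (o : Option Int),
    m.foldl (fun _ ix => some ix.1) o
    = match m.getLast? with | some p => some p.1 | none => o := by
  induction m with
  | nil => intro o; rfl
  | cons a t ih =>
    intro o
    simp only [List.foldl_cons]
    rw [ih (some a.1)]
    cases t with
    | nil => rfl
    | cons b u =>
      rw [List.getLast?_cons_cons]
      cases hgl : (b :: u).getLast? with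
      | none => simp at hgl
      | some p => rfl

-- the filtered enumeration has one entry per occurrence
theorem nl_filter_count (x : Int) : ∀ (xs : List Int) (s : Int),
    ((PySem.List.enumerate xs s).filter (fun ix => ix.2 == x)).length = xs.count x := by
  intro xs
  induction xs with
  | nil => intro s; rfl
  | cons h t ih =>
    intro s
    rw [PySem.List.enumerate_cons]
    by_cases hx : h = x
    · rw [List.filter_cons_of_pos (by simp [hx]), hx, List.length_cons, List.count_cons_self, ih]
    · rw [List.filter_cons_of_neg (by simp [hx]), List.count_cons_of_ne hx, ih]

-- mapping snd over a snd-filtered enumeration is a plain filter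
theorem nl_map_snd_filter (p : Int → Bool) : ∀ (xs : List Int) (s : Int),
    ((PySem.List.enumerate xs s).filter (fun ix => p ix.2)).map (·.2) = xs.filter p := by
  intro xs
  induction xs with
  | nil => intro s; rfl
  | cons h t ih =>
    intro s
    rw [PySem.List.enumerate_cons]
    by_cases hp : p h = true
    · rw [List.filter_cons_of_pos (by simpa using hp), List.filter_cons_of_pos hp, List.map_cons, ih]
    · rw [List.filter_cons_of_neg (by simpa using hp), List.filter_cons_of_neg hp, ih]

-- at every enumerated position, "i is both first and last occurrence" decides "count ≤ 1"
theorem nl_cond_eq (obj : List Int) (i x : Int)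
    (hmem : (i, x) ∈ PySem.List.enumerate obj) :
    ((nlFirstLast obj).1.get? x == some i && (nlFirstLast obj).2.get? x == some i)
      = decide (obj.count x ≤ 1) := by
  have hsplit := nl_fold_split (PySem.List.enumerate obj) PySem.Dict.empty PySem.Dict.empty
  set m : List (Int × Int) := (PySem.List.enumerate obj).filter (fun ix => ix.2 == x) with hm
  have hfst : (nlFirstLast obj).1.get? x = m.head?.map (·.1) := by
    rw [nlFirstLast, hsplit]
    simp only
    rw [nl_first_get, PySem.Dict.get?_empty, ← hm, nl_fold_head]
  have hlst : (nlFirstLast obj).2.get? x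
      = (match m.getLast? with | some p => some p.1 | none => (none : Option Int)) := by
    rw [nlFirstLast, hsplit]
    simp only
    rw [nl_last_get, PySem.Dict.get?_empty, ← hm, nl_fold_last]
  have hcnt : m.length = obj.count x := nl_filter_count x obj 0
  have hmm : (i, x) ∈ m := List.mem_filter.mpr ⟨hmem, by simp⟩
  have hpw : m.Pairwise (fun p q => p.1 < q.1) :=
    (PySem.List.pairwise_lt_enumerate obj 0).filter _
  rcases m with _ | ⟨a, t⟩
  · cases hmm
  rcases t with _ | ⟨b, u⟩
  · -- exactly one occurrence: a = (i, x), both sides true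
    have ha : a = (i, x) := by
      have : (i, x) = a := by simpa using hmm
      exact this.symm
    subst ha
    have : obj.count x = 1 := by rw [← hcnt]; rfl
    rw [hfst, hlst]
    simp [this]
  · -- at least two occurrences: head index < last index, so both cannot be i
    have hc2 : ¬ (obj.count x ≤ 1) := by
      rw [← hcnt]
      simp only [List.length_cons]
      omega
    rw [hfst, hlst, decide_eq_false hc2]
    have hlast_mem : (b :: u).getLast (List.cons_ne_nil b u) ∈ b :: u :=
      List.getLast_mem _
    have hlt : a.1 < ((b :: u).getLast (List.cons_ne_nil b u)).1 :=
      (List.pairwise_cons.mp hpw).1 _ hlast_mem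
    rw [List.head?_cons, List.getLast?_cons_cons,
      List.getLast?_eq_some_getLast (List.cons_ne_nil b u)]
    simp only [Option.map_some, Bool.and_eq_false_iff]
    by_cases hfi : a.1 = i
    · right
      simp only [beq_eq_false_iff_ne, ne_eq, Option.some.injEq]
      omega
    · left
      simp only [beq_eq_false_iff_ne, ne_eq, Option.some.injEq]
      exact hfi

-- ordered dedup is invisible to a predicate that only accepts count-≤-1 elements
theorem nl_filter_ofList (p : Int → Bool) : ∀ (l : List Int),
    (∀ x ∈ l, p x = true → l.count x ≤ 1) →
    (PySem.Set.ofList l).filter p = l.filter p := by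
  intro l
  induction l with
  | nil => intro _; rfl
  | cons h t ih =>
    intro hp
    have hstep : PySem.Set.ofList (h :: t) = h :: (PySem.Set.ofList t).filter (fun y => !(y == h)) := by
      rw [PySem.Set.ofList_cons]
      simp [PySem.Set.discard]
    rw [hstep]
    have ht : ∀ x ∈ t, p x = true → t.count x ≤ 1 := by
      intro x hx hpx
      have := hp x (List.mem_cons_of_mem h hx) hpx
      rw [List.count_cons] at this
      omega
    by_cases hph : p h = true
    · have hht : h ∉ t := by
        have := hp h List.mem_cons_self hph
        rw [List.count_cons_self] at this
        exact List.count_eq_zero.mp (by omega)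
      have hid : (PySem.Set.ofList t).filter (fun y => !(y == h)) = PySem.Set.ofList t := by
        refine List.filter_eq_self.mpr fun a ha => ?_
        rw [PySem.Set.mem_ofList] at ha
        simp only [Bool.not_eq_eq_eq_not, Bool.not_true, beq_eq_false_iff_ne, ne_eq]
        exact fun hc => hht (hc ▸ ha)
      rw [List.filter_cons_of_pos hph, List.filter_cons_of_pos hph, hid, ih ht]
    · rw [List.filter_cons_of_neg hph, List.filter_cons_of_neg hph, List.filter_comm]
      rw [ih ht]
      refine List.filter_eq_self.mpr fun a ha => ?_
      have hpa := (List.mem_filter.mp ha).2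
      simp only [Bool.not_eq_eq_eq_not, Bool.not_true, beq_eq_false_iff_ne, ne_eq]
      intro hc
      have hf : p h = false := Bool.eq_false_iff.mpr hph
      rw [hc, hf] at hpa
      cases hpa

-- ===== VERDICT (by name: the statement is the Claim_ definition above) =====
theorem non_lapping_spec : Claim_equal_non_lapping := by
  intro obj _
  unfold Spec_non_lapping non_lapping non_lapping_alt
  simp only []
  rw [PySem.Dict.keys_counter, PySem.List.foldl_append_ite_eq_filter, List.nil_append]
  -- A side: dedup then keep count ≤ 1; the counter lookup is the count
  have hA1 : (PySem.Set.ofList obj).filter (fun x => decide ((PySem.Dict.counter obj).getD x 0 ≤ 1))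
      = (PySem.Set.ofList obj).filter (fun x => decide (obj.count x ≤ 1)) := by
    refine List.filter_congr fun x _ => ?_
    rw [PySem.Dict.getD_counter]
    simp only [decide_eq_decide]
    exact_mod_cast Iff.rfl
  rw [hA1, nl_filter_ofList _ obj (fun x _ h => by simpa using h)]
  -- B side: the index condition decides count ≤ 1 at every position
  have hB1 : (PySem.List.enumerate obj).filter
        (fun ix => (nlFirstLast obj).1.get? ix.2 == some ix.1
          && (nlFirstLast obj).2.get? ix.2 == some ix.1)
      = (PySem.List.enumerate obj).filter (fun ix => decide (obj.count ix.2 ≤ 1)) := by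
    refine List.filter_congr fun ix hix => ?_
    obtain ⟨i, x⟩ := ix
    exact nl_cond_eq obj i x hix
  rw [hB1]
  exact (nl_map_snd_filter (fun v => decide (List.count v obj ≤ 1)) obj 0).symm
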